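-- pv_equiv track=rewrite | github.com/surilp/advent-of-code-python | _2021/day19/beacon_scanner.py | get_common_beacons
-- ===== SOURCE A (Python) =====
-- from collections import defaultdict
--
-- def get_common_beacons(base_scanner_beacons, target_scanner_beacons):
--     base_beacon_to_target_beacon_common = defaultdict(tuple)
--     for b1, b1_distances in base_scanner_beacons.items():
--         for b2, b2_distances in target_scanner_beacons.items():
--             intersection = set(b1_distances).intersection(b2_distances)
--             if len(intersection) >= 11:
--                 base_beacon_to_target_beacon_common[b1] = b2
--     return base_beacon_to_target_beacon_common
-- ===== SOURCE B (Python) =====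
-- def _inverted_index(targets):
--     # distance value -> list of target positions having that distance (distinct per target)
--     index = {}
--     for j, (_b2, d2) in enumerate(targets):
--         for dist in dict.fromkeys(d2):
--             index.setdefault(dist, []).append(j)
--     return index
--
-- def _shared_counts(index, d1):
--     # target position -> number of distinct distances of d1 shared with that target
--     counts = {}
--     for dist in dict.fromkeys(d1):
--         for j in index.get(dist, ()):
--             counts[j] = counts.get(j, 0) + 1
--     return counts
--
-- def get_common_beacons(base_scanner_beacons, target_scanner_beacons):
--     targets = list(target_scanner_beacons.items())
--     index = _inverted_index(targets)
--     result = {}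
--     for b1, d1 in base_scanner_beacons.items():
--         counts = _shared_counts(index, d1)
--         for j in range(len(targets)):
--             if counts.get(j, 0) >= 11:
--                 result[b1] = targets[j][0]
--     return result
-- ===== Notes on version B (the rewrite author's own statement) =====
-- stated objective: faster
-- what changed: Replaces the per-pair set-intersection of distance lists with an inverted index from distance value to target positions plus an incremental shared-distance counter per candidate pair, so the O(d) intersection work per beacon pair disappears.
import Mathlib
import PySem

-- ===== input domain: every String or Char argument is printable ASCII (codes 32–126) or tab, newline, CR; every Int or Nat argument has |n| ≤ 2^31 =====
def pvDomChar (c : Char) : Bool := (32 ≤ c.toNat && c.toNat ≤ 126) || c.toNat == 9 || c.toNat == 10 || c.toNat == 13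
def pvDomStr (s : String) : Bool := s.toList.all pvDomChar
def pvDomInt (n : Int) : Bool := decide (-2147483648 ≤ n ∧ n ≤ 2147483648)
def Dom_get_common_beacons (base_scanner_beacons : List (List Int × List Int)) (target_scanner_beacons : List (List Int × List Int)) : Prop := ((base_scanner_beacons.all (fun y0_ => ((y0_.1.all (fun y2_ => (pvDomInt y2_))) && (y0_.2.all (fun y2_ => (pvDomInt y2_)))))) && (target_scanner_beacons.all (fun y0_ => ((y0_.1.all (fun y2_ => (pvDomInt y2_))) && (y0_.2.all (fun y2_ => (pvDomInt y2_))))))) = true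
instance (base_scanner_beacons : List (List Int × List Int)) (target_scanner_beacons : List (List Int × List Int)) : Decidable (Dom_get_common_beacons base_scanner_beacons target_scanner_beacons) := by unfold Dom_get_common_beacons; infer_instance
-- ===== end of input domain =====

-- B replaces the per-pair set intersection with an inverted index (distance -> target
-- positions) and incremental shared-distance counters; objective: faster.


-- ===== PORT A =====
def get_common_beacons (base_scanner_beacons : List (List Int × List Int)) (target_scanner_beacons : List (List Int × List Int)) : List (List Int × List Int) :=
  (base_scanner_beacons.foldl
    (fun (d : PySem.Dict (List Int) (List Int)) p =>
      target_scanner_beacons.foldl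
        (fun (d : PySem.Dict (List Int) (List Int)) q =>
          if 11 ≤ (PySem.Set.inter (PySem.Set.ofList p.2) q.2).length
          then d.insert p.1 q.1 else d)
        d)
    PySem.Dict.empty).items

-- ===== PORT B =====
-- Source B's _inverted_index: distance value -> list of target positions having that distance
def pvInvIndex (targets : List (List Int × List Int)) : PySem.Dict Int (List Int) :=
  (PySem.List.enumerate targets).foldl
    (fun ix jq =>
      (PySem.List.dedup jq.2.2).foldl
        (fun (ix : PySem.Dict Int (List Int)) dist => ix.modify dist [] (· ++ [jq.1]))
        ix)
    PySem.Dict.empty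

-- Source B's _shared_counts: target position -> number of distinct distances of d1 shared with it
def pvSharedCounts (index : PySem.Dict Int (List Int)) (d1 : List Int) : PySem.Dict Int Int :=
  (PySem.List.dedup d1).foldl
    (fun c dist =>
      (index.getD dist []).foldl
        (fun (c : PySem.Dict Int Int) j => c.modify j 0 (· + 1))
        c)
    PySem.Dict.empty

def get_common_beacons_alt (base_scanner_beacons : List (List Int × List Int)) (target_scanner_beacons : List (List Int × List Int)) : List (List Int × List Int) :=
  let targets := target_scanner_beacons
  let index := pvInvIndex targets
  (base_scanner_beacons.foldl
    (fun (res : PySem.Dict (List Int) (List Int)) p =>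
      let counts := pvSharedCounts index p.2
      (PySem.List.pyRange 0 (targets.length : Int) 1).foldl
        (fun res j =>
          if 11 ≤ counts.getD j 0
          then res.insert p.1 (PySem.List.pyGetD targets j ([], [])).1
          else res)
        res)
    PySem.Dict.empty).items

-- ===== PRECONDITION & SPEC =====
-- Pre_ only states that each association list has distinct keys: the Python arguments are
-- dicts, which cannot hold duplicate keys, so this excludes no input the Python A accepts.
def Pre_get_common_beacons (base_scanner_beacons : List (List Int × List Int)) (target_scanner_beacons : List (List Int × List Int)) : Prop :=
  (base_scanner_beacons.map (·.1)).Nodup ∧ (target_scanner_beacons.map (·.1)).Nodup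
instance (base_scanner_beacons : List (List Int × List Int)) (target_scanner_beacons : List (List Int × List Int)) : Decidable (Pre_get_common_beacons base_scanner_beacons target_scanner_beacons) := by unfold Pre_get_common_beacons; infer_instance
def pvWitness_get_common_beacons : (List (List Int × List Int)) × (List (List Int × List Int)) :=
  ([([0], [1, 2, 3, 4, 5, 6, 7, 8, 9, 10, 11])], [([9], [1, 2, 3, 4, 5, 6, 7, 8, 9, 10, 11]), ([7], [5])])
def Spec_get_common_beacons (base_scanner_beacons : List (List Int × List Int)) (target_scanner_beacons : List (List Int × List Int)) (out : List (List Int × List Int)) : Prop := out = get_common_beacons_alt base_scanner_beacons target_scanner_beacons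
instance (base_scanner_beacons : List (List Int × List Int)) (target_scanner_beacons : List (List Int × List Int)) (out : List (List Int × List Int)) : Decidable (Spec_get_common_beacons base_scanner_beacons target_scanner_beacons out) := by unfold Spec_get_common_beacons; infer_instance

-- ===== CLAIM (what is proved, stated in full; the proofs are below) =====
def Claim_equal_get_common_beacons : Prop := ∀ (base_scanner_beacons : List (List Int × List Int)) (target_scanner_beacons : List (List Int × List Int)), Dom_get_common_beacons base_scanner_beacons target_scanner_beacons → Pre_get_common_beacons base_scanner_beacons target_scanner_beacons → Spec_get_common_beacons base_scanner_beacons target_scanner_beacons (get_common_beacons base_scanner_beacons target_scanner_beacons)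

-- ===== LEMMAS AND PROOFS =====

theorem aux0 (q : List Int) (j : Int) (ix : PySem.Dict Int (List Int)) (dist : Int) :
    ((PySem.List.dedup q).foldl (fun ix d => ix.modify d [] (· ++ [j])) ix).getD dist []
      = ix.getD dist [] ++ (if dist ∈ q then [j] else []) := by
  simp only [PySem.List.dedup_eq_ofList]
  have h1 : (PySem.Set.ofList q).foldl (fun ix d => ix.modify d [] (· ++ [j])) ix
      = ((PySem.Set.ofList q).map (fun x => (x, j))).foldl (fun d p => d.modify p.1 [] (· ++ [p.2])) ix := by
    rw [List.foldl_map]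
  rw [h1, PySem.Dict.getD_foldl_modify_append]
  congr 1
  rw [List.filter_map]
  by_cases h : dist ∈ q
  · simp [Function.comp_def, List.filter_beq, h]
  · have hc : (PySem.Set.ofList q).count dist = 0 := by
      rw [List.count_eq_zero]; simp [PySem.Set.mem_ofList, h]
    simp [Function.comp_def, List.filter_beq, hc, h]

theorem aux1 (L : List (Int × (List Int × List Int))) (ix : PySem.Dict Int (List Int)) (dist : Int) :
    (L.foldl (fun ix jq => (PySem.List.dedup jq.2.2).foldl
        (fun (ix : PySem.Dict Int (List Int)) d => ix.modify d [] (· ++ [jq.1])) ix) ix).getD dist []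
      = ix.getD dist [] ++ (L.filter (fun jq => decide (dist ∈ jq.2.2))).map (·.1) := by
  induction L generalizing ix with
  | nil => simp
  | cons a L ih =>
    rw [List.foldl_cons, ih, aux0]
    by_cases h : dist ∈ a.2.2 <;> simp [h]

theorem aux2 (L : List Int) (ix : PySem.Dict Int (List Int)) (c : PySem.Dict Int Int) (j : Int) :
    (L.foldl (fun c dist => (ix.getD dist []).foldl
        (fun (c : PySem.Dict Int Int) j => c.modify j 0 (· + 1)) c) c).getD j 0
      = c.getD j 0 + (L.map (fun dist => ((ix.getD dist []).count j : Int))).sum := by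
  induction L generalizing c with
  | nil => simp
  | cons a L ih =>
    rw [List.foldl_cons, ih, PySem.Dict.getD_foldl_modify_add_one]
    simp; ring

theorem aux3 (ts : List (List Int × List Int)) (dist : Int) (j : Int)
    (h0 : 0 ≤ j) (hn : j < (ts.length : Int)) :
    ((((PySem.List.enumerate ts).filter (fun jq => decide (dist ∈ jq.2.2))).map (·.1)).count j : Int)
      = if dist ∈ (ts[j.toNat]'(by omega)).2 then 1 else 0 := by
  set l := (((PySem.List.enumerate ts).filter (fun jq => decide (dist ∈ jq.2.2))).map (·.1)) with hl
  have hnd : l.Nodup := by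
    have hsub : l.Sublist ((PySem.List.enumerate ts).map (·.1)) := by
      apply List.Sublist.map
      exact List.filter_sublist
    rw [PySem.List.map_fst_enumerate] at hsub
    exact (PySem.List.nodup_pyRange_one 0 (0 + ts.length)).sublist hsub
  have hmem : j ∈ l ↔ dist ∈ (ts[j.toNat]'(by omega)).2 := by
    rw [hl]
    simp only [List.mem_map, List.mem_filter, PySem.List.mem_enumerate_iff]
    constructor
    · rintro ⟨jq, ⟨⟨k, hk, rfl⟩, hd⟩, h1⟩
      simp at h1 hd
      have hk2 : j.toNat = k := by omega
      exact hk2 ▸ hd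
    · intro hd
      refine ⟨(j, ts[j.toNat]'(by omega)), ⟨⟨j.toNat, by omega, by simp; omega⟩, by simpa using hd⟩, rfl⟩
  by_cases h : dist ∈ (ts[j.toNat]'(by omega)).2
  · rw [if_pos h, List.count_eq_one_of_mem hnd (hmem.mpr h)]; simp
  · rw [if_neg h]
    have : j ∉ l := fun hj => h (hmem.mp hj)
    simp [List.count_eq_zero.mpr this]

theorem pvInvIndex_getD (ts : List (List Int × List Int)) (dist : Int) :
    (pvInvIndex ts).getD dist []
      = ((PySem.List.enumerate ts).filter (fun jq => decide (dist ∈ jq.2.2))).map (·.1) := by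
  unfold pvInvIndex
  rw [aux1]
  simp

theorem pvCounts_eq_inter (ts : List (List Int × List Int)) (d1 : List Int) (j : Int)
    (h0 : 0 ≤ j) (hn : j < (ts.length : Int)) :
    (pvSharedCounts (pvInvIndex ts) d1).getD j 0
      = ((PySem.Set.inter (PySem.Set.ofList d1) (PySem.List.pyGetD ts j ([], [])).2).length : Int) := by
  have hlt : j.toNat < ts.length := by omega
  unfold pvSharedCounts
  rw [aux2]
  have key : ∀ dist : Int, (((pvInvIndex ts).getD dist []).count j : Int)
      = if dist ∈ (ts[j.toNat]'hlt).2 then 1 else 0 := by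
    intro dist
    rw [pvInvIndex_getD]
    exact aux3 ts dist j h0 hn
  simp only [key, PySem.Dict.getD_empty, zero_add]
  rw [PySem.List.pyGetD_eq_getElem ts ([], []) h0 hn]
  have hinter : PySem.Set.inter (PySem.Set.ofList d1) (ts[j.toNat]'hlt).2
      = (PySem.List.dedup d1).filter (fun x => (ts[j.toNat]'hlt).2.contains x) := rfl
  rw [hinter, ← List.countP_eq_length_filter]
  rw [show (fun dist => if dist ∈ (ts[j.toNat]'hlt).2 then (1:Int) else 0)
      = (fun dist => if (decide (dist ∈ (ts[j.toNat]'hlt).2)) = true then (1:Int) else 0) by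
    funext dist; by_cases h : dist ∈ (ts[j.toNat]'hlt).2 <;> simp [h]]
  rw [PySem.List.sum_map_ite_one_zero]
  congr 1
  apply List.countP_congr
  intro x _
  simp

theorem pv_main (b t : List (List Int × List Int)) :
    get_common_beacons b t = get_common_beacons_alt b t := by
  unfold get_common_beacons get_common_beacons_alt
  congr 1
  apply PySem.List.foldl_congr_mem
  intro res p _
  rw [← PySem.List.foldl_pyRange_zero_pyGetD' t ([], ([] : List Int))
      (fun (d : PySem.Dict (List Int) (List Int)) q =>
        if 11 ≤ (PySem.Set.inter (PySem.Set.ofList p.2) q.2).length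
        then d.insert p.1 q.1 else d) res]
  apply PySem.List.foldl_congr_mem
  intro res' j hj
  rw [PySem.List.mem_pyRange_one] at hj
  rw [pvCounts_eq_inter t p.2 j hj.1 hj.2]
  set X := (PySem.Set.inter (PySem.Set.ofList p.2) (PySem.List.pyGetD t j ([], [])).2).length
  by_cases h : 11 ≤ X
  · rw [if_pos h, if_pos (by exact_mod_cast h)]
  · rw [if_neg h, if_neg (by exact_mod_cast h)]

-- ===== VERDICT (by name: the statement is the Claim_ definition above) =====
theorem get_common_beacons_spec : Claim_equal_get_common_beacons := by
  intro b t _ _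
  unfold Spec_get_common_beacons
  exact pv_main b t
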